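-- pv_equiv track=rewrite | github.com/alessioarcara/cdmo_project | Models/MIP/column_generation.py | calculate_route_cost
-- ===== SOURCE A (Python) =====
-- def calculate_route_cost(route, n, D):
--     cost = 0
--     depot = n + 1
--     curr_node = depot
--     for next_node in route:
--         cost += D[curr_node - 1][next_node - 1]
--         curr_node = next_node
--     cost += D[curr_node - 1][depot - 1]
--     return cost
-- ===== SOURCE B (Python) =====
-- def calculate_route_cost(route, n, D):
--     depot = n + 1
--     path = [depot, *route, depot]
--
--     # Divide and conquer: cost of the edge chain path[lo..hi], split at the midpoint.
--     def seg(lo, hi):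
--         if hi - lo == 1:
--             return D[path[lo] - 1][path[hi] - 1]
--         mid = (lo + hi) // 2
--         return seg(lo, mid) + seg(mid, hi)
--
--     return seg(0, len(path) - 1)
-- ===== Notes on version B (the rewrite author's own statement) =====
-- stated objective: alternative
-- what changed: Replaces the linear accumulator loop (plus separately-added return edge) with a divide-and-conquer recursion over the depot-padded path: the cost of a segment is the cost of its two halves split at the midpoint, the base case being a single edge.
import Mathlib
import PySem

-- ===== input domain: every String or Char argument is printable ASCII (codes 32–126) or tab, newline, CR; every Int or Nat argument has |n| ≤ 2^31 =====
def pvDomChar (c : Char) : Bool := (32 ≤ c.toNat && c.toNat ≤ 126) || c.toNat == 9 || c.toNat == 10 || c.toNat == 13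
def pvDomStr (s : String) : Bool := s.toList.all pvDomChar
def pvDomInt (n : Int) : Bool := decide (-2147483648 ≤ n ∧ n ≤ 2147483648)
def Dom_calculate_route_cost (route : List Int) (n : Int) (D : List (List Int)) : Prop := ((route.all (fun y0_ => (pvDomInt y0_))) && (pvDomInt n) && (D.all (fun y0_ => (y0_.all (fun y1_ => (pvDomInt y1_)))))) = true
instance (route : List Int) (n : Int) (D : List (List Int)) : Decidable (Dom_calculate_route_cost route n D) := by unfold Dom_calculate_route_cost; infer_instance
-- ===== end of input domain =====

-- B replaces the linear accumulator loop with a divide-and-conquer recursion over the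
-- depot-padded path (cost of a segment = cost of its two halves split at the midpoint).

-- ===== PORT A =====
-- Shared helper for the Python indexing D[a-1][b-1] (default 0 is never used inside Pre_, where every index is in range).
def pvLook (D : List (List Int)) (a b : Int) : Int :=
  PySem.List.pyGetD (PySem.List.pyGetD D (a - 1) []) (b - 1) 0

def calculate_route_cost (route : List Int) (n : Int) (D : List (List Int)) : Int :=
  let depot := n + 1
  let s := route.foldl (fun (s : Int × Int) next => (s.1 + pvLook D s.2 next, next)) (0, depot)
  s.1 + pvLook D s.2 depot

-- ===== PORT B =====
-- seg(lo,hi): cost of the edge chain path[lo..hi]; only ever called with lo < hi.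
-- The `hi - lo ≤ 1` branch returning 0 is a totality guard only (unreachable from
-- calculate_route_cost_alt, whose path has ≥ 2 elements; Python's seg would not return there).
def pvSeg (path : List Int) (D : List (List Int)) (lo hi : Nat) : Int :=
  if hi - lo = 1 then
    pvLook D (path.getD lo 0) (path.getD hi 0)
  else if hi - lo ≤ 1 then 0
  else
    let mid := (lo + hi) / 2
    pvSeg path D lo mid + pvSeg path D mid hi
termination_by hi - lo
decreasing_by all_goals omega

def calculate_route_cost_alt (route : List Int) (n : Int) (D : List (List Int)) : Int :=
  let depot := n + 1
  let path := depot :: (route ++ [depot])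
  pvSeg path D 0 (path.length - 1)

-- ===== PRECONDITION & SPEC =====
-- Pre_ excludes exactly the inputs on which the Python A raises IndexError: some edge (a,b) of the
-- path depot::route++[depot] has D[a-1] or D[a-1][b-1] out of range.
def Pre_calculate_route_cost (route : List Int) (n : Int) (D : List (List Int)) : Prop :=
  List.IsChain (fun a b =>
    ((PySem.List.pyGet? D (a - 1)).bind (fun row => PySem.List.pyGet? row (b - 1))).isSome = true)
    ((n + 1) :: (route ++ [n + 1]))
instance (route : List Int) (n : Int) (D : List (List Int)) : Decidable (Pre_calculate_route_cost route n D) := by unfold Pre_calculate_route_cost; infer_instance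

def pvWitness_calculate_route_cost : List Int × Int × List (List Int) := ([1], 1, [[0, 3], [4, 0]])

def Spec_calculate_route_cost (route : List Int) (n : Int) (D : List (List Int)) (out : Int) : Prop := out = calculate_route_cost_alt route n D
instance (route : List Int) (n : Int) (D : List (List Int)) (out : Int) : Decidable (Spec_calculate_route_cost route n D out) := by unfold Spec_calculate_route_cost; infer_instance

-- ===== CLAIM (what is proved, stated in full; the proofs are below) =====
def Claim_equal_calculate_route_cost : Prop := ∀ (route : List Int) (n : Int) (D : List (List Int)), Dom_calculate_route_cost route n D → Pre_calculate_route_cost route n D → Spec_calculate_route_cost route n D (calculate_route_cost route n D)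

-- ===== LEMMAS AND PROOFS =====

-- Sum of consecutive edges of a list (the common middle both ports are reduced to).
def pvEdges (D : List (List Int)) : List Int → Int
  | a :: b :: rest => pvLook D a b + pvEdges D (b :: rest)
  | _ => 0

-- A's accumulator fold over l, followed by the final edge to depot, equals the edge sum of a::l++[depot].
theorem pvA_eq (D : List (List Int)) (depot : Int) :
    ∀ (l : List Int) (a c : Int),
      (l.foldl (fun (s : Int × Int) next => (s.1 + pvLook D s.2 next, next)) (c, a)).1
        + pvLook D (l.foldl (fun (s : Int × Int) next => (s.1 + pvLook D s.2 next, next)) (c, a)).2 depot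
        = c + pvEdges D (a :: l ++ [depot]) := by
  intro l
  induction l with
  | nil => intro a c; simp [pvEdges]
  | cons x xs ih =>
    intro a c
    have h := ih x (c + pvLook D a x)
    simp only [List.foldl_cons, List.cons_append] at *
    rw [h, pvEdges]
    ring

-- Edge sum as an indexed sum over positions.
theorem pvEdges_eq_sum (D : List (List Int)) :
    ∀ (l : List Int),
      pvEdges D l = ∑ i ∈ Finset.range (l.length - 1),
        pvLook D (l.getD i 0) (l.getD (i + 1) 0) := by
  intro l
  induction l with
  | nil => simp [pvEdges]
  | cons a t ih =>
    cases t with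
    | nil => simp [pvEdges]
    | cons b rest =>
      rw [pvEdges, ih]
      have hlen : (a :: b :: rest).length - 1 = ((b :: rest).length - 1) + 1 := by
        simp
      rw [hlen, Finset.sum_range_succ']
      simp [List.getD]
      ring

-- The divide-and-conquer segment cost equals the indexed sum over its range of edges.
theorem pvSeg_eq_sum (path : List Int) (D : List (List Int)) :
    ∀ (k lo hi : Nat), hi - lo ≤ k → lo < hi →
      pvSeg path D lo hi = ∑ i ∈ Finset.Ico lo hi,
        pvLook D (path.getD i 0) (path.getD (i + 1) 0) := by
  intro k
  induction k with
  | zero => intro lo hi hk hlt; omega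
  | succ k ih =>
    intro lo hi hk hlt
    rw [pvSeg]
    by_cases h1 : hi - lo = 1
    · have : hi = lo + 1 := by omega
      subst this
      simp
    · have h2 : ¬ hi - lo ≤ 1 := by omega
      simp only [h1, h2, if_false]
      have hmid1 : lo < (lo + hi) / 2 := by omega
      have hmid2 : (lo + hi) / 2 < hi := by omega
      rw [ih lo ((lo + hi) / 2) (by omega) hmid1,
          ih ((lo + hi) / 2) hi (by omega) hmid2,
          Finset.sum_Ico_consecutive _ (by omega : lo ≤ (lo + hi) / 2) (by omega : (lo + hi) / 2 ≤ hi)]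

theorem calculate_route_cost_spec : Claim_equal_calculate_route_cost := by
  intro route n D _ _
  unfold Spec_calculate_route_cost calculate_route_cost calculate_route_cost_alt
  have hA := pvA_eq D (n + 1) route (n + 1) 0
  simp only [zero_add] at hA
  rw [hA]
  have hlen : ((n + 1) :: (route ++ [n + 1])).length - 1 = route.length + 1 := by simp
  have hlt : 0 < ((n + 1) :: (route ++ [n + 1])).length - 1 := by simp
  rw [pvSeg_eq_sum ((n + 1) :: (route ++ [n + 1])) D _ 0 _ le_rfl hlt,
      pvEdges_eq_sum D]
  rw [← Finset.range_eq_Ico]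
  simp
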